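-- pv_equiv track=rewrite | github.com/ZPE-Epodreczniki/python-szkola-podstawowa | N16_Listy/testerka_kod.py | dziel_lista
-- ===== SOURCE A (Python) =====
-- def dziel_lista(lista):
--     parzyste = []
--     nieparzyste = []
--     for element in lista:
--         if element % 2 == 0:
--             parzyste.append(element)
--         else:
--             nieparzyste.append(element)
--     dl_parzyste = len(parzyste)
--     dl_nieparzyste = len(nieparzyste)
--
--     if dl_parzyste == dl_nieparzyste:
--         return [0]
--
--     if dl_parzyste > dl_nieparzyste:
--         return parzyste
--     else:
--         return nieparzyste
-- ===== SOURCE B (Python) =====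
-- def dziel_lista(lista):
--     evens = sum(1 for x in lista if x % 2 == 0)
--     odds = len(lista) - evens
--     if evens == odds:
--         return [0]
--     if evens > odds:
--         return [x for x in lista if x % 2 == 0]
--     return [x for x in lista if x % 2 != 0]
-- ===== Notes on version B (the rewrite author's own statement) =====
-- stated objective: alternative
-- what changed: B counts evens in one pass and derives odds from the length, then materialises only the winning partition with a selective filter, instead of building both sublists simultaneously.
import Mathlib
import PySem

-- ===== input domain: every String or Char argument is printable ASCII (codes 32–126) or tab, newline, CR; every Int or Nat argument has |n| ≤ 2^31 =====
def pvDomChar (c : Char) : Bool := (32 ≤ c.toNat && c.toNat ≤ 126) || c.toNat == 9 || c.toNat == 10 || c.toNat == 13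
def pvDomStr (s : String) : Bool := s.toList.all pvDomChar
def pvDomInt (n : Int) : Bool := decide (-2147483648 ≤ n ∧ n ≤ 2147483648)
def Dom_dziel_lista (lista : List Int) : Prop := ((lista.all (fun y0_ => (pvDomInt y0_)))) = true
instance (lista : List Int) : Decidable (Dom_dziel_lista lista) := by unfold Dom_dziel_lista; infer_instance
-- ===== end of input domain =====

-- B counts the evens first and materialises only the winning partition; A builds both sublists in one loop.

-- ===== PORT A =====
def dziel_lista (lista : List Int) : List Int :=
  let pn := lista.foldl
    (fun (pn : List Int × List Int) element =>
      if PySem.Int.mod element 2 == 0 then (pn.1 ++ [element], pn.2)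
      else (pn.1, pn.2 ++ [element]))
    ([], [])
  let dl_parzyste := pn.1.length
  let dl_nieparzyste := pn.2.length
  if dl_parzyste == dl_nieparzyste then [0]
  else if dl_parzyste > dl_nieparzyste then pn.1
  else pn.2

-- ===== PORT B =====
def dziel_lista_alt (lista : List Int) : List Int :=
  let evens := lista.countP (fun x => PySem.Int.mod x 2 == 0)
  let odds := lista.length - evens
  if evens == odds then [0]
  else if evens > odds then lista.filter (fun x => PySem.Int.mod x 2 == 0)
  else lista.filter (fun x => !(PySem.Int.mod x 2 == 0))

-- ===== PRECONDITION & SPEC =====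
def Spec_dziel_lista (lista : List Int) (out : List Int) : Prop := out = dziel_lista_alt lista
instance (lista : List Int) (out : List Int) : Decidable (Spec_dziel_lista lista out) := by unfold Spec_dziel_lista; infer_instance

-- ===== CLAIM (what is proved, stated in full; the proofs are below) =====
def Claim_equal_dziel_lista : Prop := ∀ (lista : List Int), Dom_dziel_lista lista → Spec_dziel_lista lista (dziel_lista lista)

-- ===== LEMMAS AND PROOFS =====

-- A's loop produces exactly (acc ++ filter even, acc ++ filter odd).
theorem dziel_lista_foldl_eq (lista p n : List Int) :
    lista.foldl
      (fun (pn : List Int × List Int) element =>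
        if PySem.Int.mod element 2 == 0 then (pn.1 ++ [element], pn.2)
        else (pn.1, pn.2 ++ [element]))
      (p, n)
    = (p ++ lista.filter (fun x => PySem.Int.mod x 2 == 0),
       n ++ lista.filter (fun x => !(PySem.Int.mod x 2 == 0))) := by
  induction lista generalizing p n with
  | nil => simp
  | cons h t ih =>
    simp only [List.foldl_cons, List.filter_cons]
    by_cases hc : PySem.Int.mod h 2 == 0
    · simp only [hc, if_true, ih]
      simp
    · simp only [hc, Bool.false_eq_true, ih]
      simp

theorem countP_filter_len (lista : List Int) :
    (lista.filter (fun x => PySem.Int.mod x 2 == 0)).length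
      = lista.countP (fun x => PySem.Int.mod x 2 == 0) := by
  simp [List.countP_eq_length_filter]

theorem countP_not_filter_len (lista : List Int) :
    (lista.filter (fun x => !(PySem.Int.mod x 2 == 0))).length
      = lista.length - lista.countP (fun x => PySem.Int.mod x 2 == 0) := by
  induction lista with
  | nil => simp
  | cons h t ih =>
    have hle : List.countP (fun x => PySem.Int.mod x 2 == 0) t ≤ t.length :=
      List.countP_le_length
    by_cases hc : PySem.Int.mod h 2 == 0
    · have hc' : (PySem.Int.mod h 2 == 0) = true := hc
      simp only [List.filter_cons, List.countP_cons, hc', List.length_cons,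
        Bool.not_true, Bool.false_eq_true, ite_true, ite_false]
      omega
    · have hc' : (PySem.Int.mod h 2 == 0) = false := by
        exact Bool.eq_false_iff.mpr (by simpa using hc)
      simp only [List.filter_cons, List.countP_cons, hc', List.length_cons,
        Bool.not_false, Bool.false_eq_true, ite_true, ite_false]
      omega

-- ===== VERDICT (by name: the statement is the Claim_ definition above) =====
theorem dziel_lista_spec : Claim_equal_dziel_lista := by
  intro lista _
  unfold Spec_dziel_lista dziel_lista dziel_lista_alt
  rw [dziel_lista_foldl_eq]
  simp only [List.nil_append, countP_filter_len, countP_not_filter_len]
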